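-- pv_equiv track=rewrite | github.com/ppopdesk/tti_project | think_on_disagreement_hyperparam/tod_hyperparam_tuning.py | unanimous_vote
-- ===== SOURCE A (Python) =====
-- from typing import Dict, List, Optional
--
-- def unanimous_vote(letters: List[Optional[str]]) -> Optional[str]:
--     clean = [x for x in letters if x is not None]
--     if len(clean) != len(letters):
--         return None
--     first = clean[0]
--     if all(x == first for x in clean):
--         return first
--     return None
-- ===== SOURCE B (Python) =====
-- from typing import List, Optional
--
-- def unanimous_vote(letters: List[Optional[str]]) -> Optional[str]:
--     first = letters[0]
--     for prev, cur in zip(letters, letters[1:]):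
--         if prev != cur:
--             return None
--     return first
-- ===== Notes on version B (the rewrite author's own statement) =====
-- stated objective: simpler
-- what changed: B replaces A's staged passes (build a None-filtered list, compare lengths, then compare every element to a pivot) with a single chain scan over adjacent pairs zip(letters, letters[1:]): any neighbouring disagreement returns None immediately, and an all-None list succeeds through the chain and returns first (= None) with no explicit None handling at all.
import Mathlib
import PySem

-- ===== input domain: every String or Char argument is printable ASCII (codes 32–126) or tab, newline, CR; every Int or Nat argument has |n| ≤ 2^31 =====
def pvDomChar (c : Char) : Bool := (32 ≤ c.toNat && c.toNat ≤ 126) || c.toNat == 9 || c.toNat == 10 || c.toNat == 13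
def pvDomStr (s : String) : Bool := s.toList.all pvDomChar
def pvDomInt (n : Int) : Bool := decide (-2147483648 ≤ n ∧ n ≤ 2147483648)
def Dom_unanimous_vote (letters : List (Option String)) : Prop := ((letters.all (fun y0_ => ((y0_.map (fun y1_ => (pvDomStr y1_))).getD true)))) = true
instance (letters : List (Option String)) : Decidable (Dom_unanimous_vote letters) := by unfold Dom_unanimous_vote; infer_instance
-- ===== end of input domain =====

-- B replaces A's staged passes (None-filter + length compare + compare-to-pivot) with a single
-- early-exit scan over adjacent pairs zip(letters, letters[1:]) (objective: simpler).

-- ===== PORT A =====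
def unanimous_vote (letters : List (Option String)) : Option String :=
  let clean := letters.filter (fun x => x.isSome)      -- [x for x in letters if x is not None]
  if clean.length ≠ letters.length then none
  else
    match PySem.List.pyGet? clean 0 with               -- clean[0]; none = IndexError, excluded by Pre_
    | none => none
    | some first =>
      if clean.all (fun x => x == first) then first else none

-- ===== PORT B =====
-- the for-loop over zip(letters, letters[1:]) with its early `return None`
def pvChain (first : Option String) : List ((Option String) × (Option String)) → Option String
  | [] => first
  | (p, c) :: rest => if p ≠ c then none else pvChain first rest

def unanimous_vote_alt (letters : List (Option String)) : Option String :=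
  match PySem.List.pyGet? letters 0 with               -- first = letters[0]; none = IndexError, excluded by Pre_
  | none => none
  | some first =>
    pvChain first (letters.zip (PySem.List.slice letters (some 1) none))   -- zip(letters, letters[1:])

-- ===== PRECONDITION & SPEC =====
-- Both programs raise IndexError (clean[0] / letters[0]) on the empty list, so Pre_ excludes exactly [].
def Pre_unanimous_vote (letters : List (Option String)) : Prop := letters ≠ []
instance (letters : List (Option String)) : Decidable (Pre_unanimous_vote letters) := by unfold Pre_unanimous_vote; infer_instance
def pvWitness_unanimous_vote : List (Option String) := [some "a", some "a"]
def Spec_unanimous_vote (letters : List (Option String)) (out : Option String) : Prop := out = unanimous_vote_alt letters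
instance (letters : List (Option String)) (out : Option String) : Decidable (Spec_unanimous_vote letters out) := by unfold Spec_unanimous_vote; infer_instance

-- ===== CLAIM (what is proved, stated in full; the proofs are below) =====
def Claim_equal_unanimous_vote : Prop := ∀ (letters : List (Option String)), Dom_unanimous_vote letters → Pre_unanimous_vote letters → Spec_unanimous_vote letters (unanimous_vote letters)

-- ===== LEMMAS AND PROOFS =====

-- If no element is `none`, filtering out `none` keeps the whole list.
theorem pv_filter_eq_self (letters : List (Option String))
    (h : (none : Option String) ∉ letters) :
    letters.filter (fun x => x.isSome) = letters := by
  apply List.filter_eq_self.mpr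
  intro a ha
  cases a with
  | none => exact absurd ha h
  | some s => rfl

-- If some element is `none`, the filtered list is strictly shorter.
theorem pv_filter_lt (letters : List (Option String))
    (h : (none : Option String) ∈ letters) :
    (letters.filter (fun x => x.isSome)).length < letters.length := by
  apply List.length_filter_lt_length_iff_exists.mpr
  exact ⟨none, h, by simp⟩

-- The adjacent-pair chain on x :: xs succeeds iff every element of xs equals x.
theorem pv_chain_eq (first : Option String) :
    ∀ (xs : List (Option String)) (x : Option String),
      pvChain first ((x :: xs).zip xs) = (if ∀ y ∈ xs, y = x then first else none) := by
  intro xs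
  induction xs with
  | nil => intro x; simp [pvChain]
  | cons y ys ih =>
    intro x
    show pvChain first ((x, y) :: (y :: ys).zip ys) = _
    by_cases hxy : x = y
    · subst hxy
      rw [pvChain, if_neg (by simp), ih x]
      by_cases hall : ∀ z ∈ ys, z = x
      · rw [if_pos hall, if_pos (by intro z hz; rcases List.mem_cons.mp hz with rfl | hm; rfl; exact hall z hm)]
      · rw [if_neg hall, if_neg (fun h => hall (fun z hz => h z (List.mem_cons_of_mem _ hz)))]
    · rw [pvChain, if_pos (by simpa using hxy),
        if_neg (fun h => hxy (h y (List.mem_cons_self)).symm)]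

-- ===== VERDICT (by name: the statement is the Claim_ definition above) =====
theorem unanimous_vote_spec : Claim_equal_unanimous_vote := by
  intro letters _ hpre
  unfold Spec_unanimous_vote unanimous_vote unanimous_vote_alt
  obtain ⟨x, xs, rfl⟩ := List.exists_cons_of_ne_nil hpre
  have hg : PySem.List.pyGet? (x :: xs) 0 = some x := by
    simp [PySem.List.pyGet?, PySem.List.pyIdx?]
  have hslice : PySem.List.slice (x :: xs) (some 1) none = xs := by
    rw [PySem.List.slice_from_one]; rfl
  rw [hg, hslice]
  dsimp only
  rw [pv_chain_eq]
  by_cases hn : (none : Option String) ∈ (x :: xs)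
  · -- A: length mismatch → none; B: either some neighbour disagrees, or all equal x = none
    have hlt := pv_filter_lt (x :: xs) hn
    rw [if_pos (Nat.ne_of_lt hlt)]
    by_cases hall : ∀ y ∈ xs, y = x
    · have hx : x = none := by
        rcases List.mem_cons.mp hn with h | h
        · exact h.symm
        · exact (hall none h).symm
      rw [if_pos hall, hx]
    · rw [if_neg hall]
  · -- no None: clean = letters, first = x; unanimity is the same condition on both sides
    rw [pv_filter_eq_self _ hn, if_neg (fun h => h rfl), hg]
    dsimp only
    by_cases hall : ∀ y ∈ xs, y = x
    · rw [if_pos (by simp only [List.all_cons, List.all_eq_true, beq_self_eq_true,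
          Bool.true_and, beq_iff_eq]; exact hall), if_pos hall]
    · rw [if_neg (by simp only [List.all_cons, List.all_eq_true, beq_self_eq_true,
          Bool.true_and, beq_iff_eq]; exact hall), if_neg hall]
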